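-- pv_equiv track=rewrite | github.com/DNA-origamicon/NADOC | backend/core/scaffold_router.py | _merge_interval_maps
-- ===== SOURCE A (Python) =====
-- def _merge_interval_maps(
--     target: dict[str, list[tuple[int, int]]],
--     source: dict[str, list[tuple[int, int]]],
-- ) -> dict[str, list[tuple[int, int]]]:
--     merged = {helix_id: list(spans) for helix_id, spans in target.items()}
--     for helix_id, spans in source.items():
--         merged.setdefault(helix_id, []).extend(spans)
--     out: dict[str, list[tuple[int, int]]] = {}
--     for helix_id, spans in merged.items():
--         spans = sorted(spans)
--         helix_out: list[tuple[int, int]] = []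
--         for lo, hi in spans:
--             if not helix_out or lo > helix_out[-1][1] + 1:
--                 helix_out.append((lo, hi))
--             else:
--                 helix_out[-1] = (helix_out[-1][0], max(helix_out[-1][1], hi))
--         out[helix_id] = helix_out
--     return out
-- ===== SOURCE B (Python) =====
-- def _coalesce_back(spans):
--     # Consume the sorted spans from the RIGHT: keep the already-coalesced
--     # suffix, prepend each span to it, cascading merges while it reaches
--     # the current first interval.
--     out = []
--     for lo, hi in reversed(spans):
--         while out and out[0][0] <= hi + 1:
--             hi = max(hi, out[0][1])
--             out.pop(0)
--         out.insert(0, (lo, hi))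
--     return out
--
--
-- def _merge_interval_maps(
--     target: dict[str, list[tuple[int, int]]],
--     source: dict[str, list[tuple[int, int]]],
-- ) -> dict[str, list[tuple[int, int]]]:
--     pooled: dict[str, list[tuple[int, int]]] = {}
--     for m in (target, source):
--         for helix_id, spans in m.items():
--             pooled[helix_id] = pooled.get(helix_id, []) + list(spans)
--     return {h: _coalesce_back(sorted(s)) for h, s in pooled.items()}
-- ===== Notes on version B (the rewrite author's own statement) =====
-- stated objective: alternative
-- what changed: B coalesces each sorted span list by the opposite traversal: it walks the spans right-to-left, prepending each span to the already-coalesced suffix and cascading merges into its front intervals while they are within reach, instead of A's left-to-right pass that mutates the last emitted interval; the per-helix pooling is one get/concat loop over both maps instead of copy-then-setdefault/extend.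
import Mathlib
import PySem

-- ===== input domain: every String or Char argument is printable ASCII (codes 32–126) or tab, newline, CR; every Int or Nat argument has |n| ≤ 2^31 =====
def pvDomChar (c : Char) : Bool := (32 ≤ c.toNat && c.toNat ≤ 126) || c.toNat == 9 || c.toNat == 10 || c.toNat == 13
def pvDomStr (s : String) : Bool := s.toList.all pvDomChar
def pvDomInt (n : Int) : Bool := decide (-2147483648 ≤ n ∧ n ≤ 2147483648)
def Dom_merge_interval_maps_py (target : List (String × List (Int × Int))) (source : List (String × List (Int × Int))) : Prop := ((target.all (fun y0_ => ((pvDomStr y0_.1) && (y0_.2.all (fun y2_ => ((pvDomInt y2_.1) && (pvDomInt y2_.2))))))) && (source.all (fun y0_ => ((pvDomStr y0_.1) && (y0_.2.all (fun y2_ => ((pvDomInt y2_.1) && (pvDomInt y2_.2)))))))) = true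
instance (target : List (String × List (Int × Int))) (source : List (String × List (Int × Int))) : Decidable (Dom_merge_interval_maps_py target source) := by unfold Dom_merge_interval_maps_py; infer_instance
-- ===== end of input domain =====

-- B coalesces each sorted span list by the opposite traversal (right-to-left, cascading merges into the
-- front of the coalesced suffix) instead of A's left-to-right mutate-last pass (objective: alternative).

-- ===== PORT A =====
-- A's inner loop: append a new interval, or overwrite the last emitted interval in place
def pvStepA (ho : List (Int × Int)) (p : Int × Int) : List (Int × Int) :=
  match ho.getLast? with
  | none => ho ++ [p]
  | some c => if p.1 > c.2 + 1 then ho ++ [p] else ho.dropLast ++ [(c.1, max c.2 p.2)]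

def merge_interval_maps_py (target : List (String × List (Int × Int))) (source : List (String × List (Int × Int))) : List (String × List (Int × Int)) :=
  -- merged = {helix_id: list(spans) for ...}
  let merged : PySem.Dict String (List (Int × Int)) :=
    List.foldl (fun d kv => d.insert kv.1 kv.2) PySem.Dict.empty target
  -- merged.setdefault(helix_id, []).extend(spans)
  let merged :=
    List.foldl (fun d kv => d.insert kv.1 (d.getD kv.1 [] ++ kv.2)) merged source
  -- out[helix_id] = coalesced sorted spans
  (List.foldl
    (fun (o : PySem.Dict String (List (Int × Int))) kv =>
      o.insert kv.1 (List.foldl pvStepA [] (PySem.List.sorted2 kv.2 Prod.fst Prod.snd)))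
    PySem.Dict.empty merged.items).items

-- ===== PORT B =====
-- B's inner while loop: cascade-merge (lo, hi) into the front of the coalesced suffix, then prepend
def pvAbsorb (lo : Int) (hi : Int) : List (Int × Int) → List (Int × Int)
  | [] => [(lo, hi)]
  | (flo, fhi) :: rest =>
      if flo ≤ hi + 1 then pvAbsorb lo (max hi fhi) rest
      else (lo, hi) :: (flo, fhi) :: rest

-- for lo, hi in reversed(spans): ... out.insert(0, (lo, hi))
def pvCoalesceBack (spans : List (Int × Int)) : List (Int × Int) :=
  spans.reverse.foldl (fun out p => pvAbsorb p.1 p.2 out) []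

def merge_interval_maps_py_alt (target : List (String × List (Int × Int))) (source : List (String × List (Int × Int))) : List (String × List (Int × Int)) :=
  -- pooled[helix_id] = pooled.get(helix_id, []) + list(spans), over target then source
  let pooled : PySem.Dict String (List (Int × Int)) :=
    List.foldl (fun d kv => d.insert kv.1 (d.getD kv.1 [] ++ kv.2)) PySem.Dict.empty target
  let pooled :=
    List.foldl (fun d kv => d.insert kv.1 (d.getD kv.1 [] ++ kv.2)) pooled source
  -- {h: _coalesce_back(sorted(s)) for h, s in pooled.items()}
  pooled.items.map (fun kv => (kv.1, pvCoalesceBack (PySem.List.sorted2 kv.2 Prod.fst Prod.snd)))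

-- ===== PRECONDITION & SPEC =====
-- Pre_ excludes association lists with duplicate keys: those do not represent Python dicts
-- (the inputs are dict[str, list] in Python, whose keys are necessarily distinct).
def Pre_merge_interval_maps_py (target : List (String × List (Int × Int))) (source : List (String × List (Int × Int))) : Prop :=
  (target.map Prod.fst).Nodup ∧ (source.map Prod.fst).Nodup
instance (target : List (String × List (Int × Int))) (source : List (String × List (Int × Int))) : Decidable (Pre_merge_interval_maps_py target source) := by unfold Pre_merge_interval_maps_py; infer_instance

def pvWitness_merge_interval_maps_py : (List (String × List (Int × Int))) × (List (String × List (Int × Int))) :=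
  ([("h0", [(4, 6), (0, 2)]), ("h1", [(1, 1)])], [("h0", [(3, 3)]), ("h2", [(5, 2)])])

def Spec_merge_interval_maps_py (target : List (String × List (Int × Int))) (source : List (String × List (Int × Int))) (out : List (String × List (Int × Int))) : Prop := out = merge_interval_maps_py_alt target source
instance (target : List (String × List (Int × Int))) (source : List (String × List (Int × Int))) (out : List (String × List (Int × Int))) : Decidable (Spec_merge_interval_maps_py target source out) := by unfold Spec_merge_interval_maps_py; infer_instance

-- ===== CLAIM (what is proved, stated in full; the proofs are below) =====
def Claim_equal_merge_interval_maps_py : Prop := ∀ (target : List (String × List (Int × Int))) (source : List (String × List (Int × Int))), Dom_merge_interval_maps_py target source → Pre_merge_interval_maps_py target source → Spec_merge_interval_maps_py target source (merge_interval_maps_py target source)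

-- ===== LEMMAS AND PROOFS =====

theorem pv_getD_mk_cons (k : String) (v : List (Int × Int)) (rest : List (String × List (Int × Int))) (x : String) :
    (PySem.Dict.mk ((k, v) :: rest)).getD x [] = if k == x then v else (PySem.Dict.mk rest).getD x [] := by
  rw [PySem.Dict.getD_eq_get?_getD, PySem.Dict.get?_mk_cons]
  by_cases h : k == x <;> simp [h, PySem.Dict.getD_eq_get?_getD]

theorem pv_getD_not_mem (l : List (String × List (Int × Int))) (x : String) (h : x ∉ l.map Prod.fst) :
    (PySem.Dict.mk l).getD x [] = [] := by
  apply PySem.Dict.getD_of_not_contains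
  rw [PySem.Dict.contains_eq_decide_mem_keys]
  simpa using h

theorem pv_merge_items (src : List (String × List (Int × Int))) :
    ∀ (d : PySem.Dict String (List (Int × Int))), d.keys.Nodup → (src.map Prod.fst).Nodup →
    (List.foldl (fun d kv => d.insert kv.1 (d.getD kv.1 [] ++ kv.2)) d src).items
      = d.items.map (fun e => (e.1, e.2 ++ (PySem.Dict.mk src).getD e.1 []))
        ++ src.filter (fun kv => !(d.contains kv.1)) := by
  induction src with
  | nil =>
      intro d hd hs
      simp [PySem.Dict.getD_eq_get?_getD, PySem.Dict.get?]
  | cons kv rest ih =>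
      intro d hd hs
      have hk : kv.1 ∉ rest.map Prod.fst := by
        simp only [List.map_cons, List.nodup_cons] at hs; exact hs.1
      have hrest : (rest.map Prod.fst).Nodup := by
        simp only [List.map_cons, List.nodup_cons] at hs; exact hs.2
      have hne : ∀ kv' ∈ rest, kv'.1 ≠ kv.1 := by
        intro kv' h' heq
        exact hk (heq ▸ List.mem_map_of_mem h')
      rw [List.foldl_cons]
      rw [ih (d.insert kv.1 (d.getD kv.1 [] ++ kv.2)) (PySem.Dict.nodup_keys_insert _ _ _ hd) hrest]
      have hfilt : rest.filter (fun kv' => !((d.insert kv.1 (d.getD kv.1 [] ++ kv.2)).contains kv'.1))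
          = rest.filter (fun kv' => !(d.contains kv'.1)) := by
        apply List.filter_congr
        intro kv' h'
        rw [PySem.Dict.contains_insert]
        have : (kv'.1 == kv.1) = false := by simpa using hne kv' h'
        rw [this]; simp
      by_cases hc : d.contains kv.1 = true
      · rw [PySem.Dict.items_insert_of_contains d _ hc, hfilt]
        have hfc : List.filter (fun kv' => !(d.contains kv'.1)) (kv :: rest)
            = List.filter (fun kv' => !(d.contains kv'.1)) rest := by
          simp [hc]
        rw [hfc, List.map_map]
        congr 1
        apply List.map_congr_left
        intro e he
        by_cases heq : e.1 = kv.1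
        · have hbeq : (e.1 == kv.1) = true := by simpa using heq
          have he2 : e.2 = d.getD kv.1 [] := heq ▸ ((PySem.Dict.getD_of_mem_items d (show (e.1, e.2) ∈ d.items by simpa using he) hd [] : d.getD e.1 [] = e.2).symm)
          simp only [Function.comp, hbeq, if_pos]
          rw [pv_getD_mk_cons, pv_getD_not_mem rest kv.1 hk]
          have : (kv.1 == e.1) = true := by simpa using heq.symm
          rw [this, heq, he2]
          simp
        · have hbeq : (e.1 == kv.1) = false := by simpa using heq
          simp only [Function.comp, hbeq, if_neg, Bool.false_eq_true, not_false_iff]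
          rw [pv_getD_mk_cons]
          have : (kv.1 == e.1) = false := by simpa using (Ne.symm heq)
          rw [this]
          simp
      · have hc' : d.contains kv.1 = false := by simpa using hc
        rw [PySem.Dict.items_insert_of_not_contains d _ hc', hfilt]
        rw [PySem.Dict.getD_of_not_contains d [] hc']
        rw [List.map_append]
        have hmap : d.items.map (fun e => (e.1, e.2 ++ (PySem.Dict.mk rest).getD e.1 []))
            = d.items.map (fun e => (e.1, e.2 ++ (PySem.Dict.mk (kv :: rest)).getD e.1 [])) := by
          apply List.map_congr_left
          intro e he
          have heK : e.1 ∈ d.keys := PySem.Dict.mem_keys_of_mem_items d he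
          have heq : (kv.1 == e.1) = false := by
            have : e.1 ≠ kv.1 := by
              intro h; rw [PySem.Dict.contains_eq_decide_mem_keys] at hc'; simp at hc'; exact hc' (h ▸ heK)
            simpa using (Ne.symm this)
          rw [show (PySem.Dict.mk (kv :: rest)) = (PySem.Dict.mk ((kv.1, kv.2) :: rest)) by simp, pv_getD_mk_cons, heq]
          simp
        rw [← hmap]
        have hfc : List.filter (fun kv' => !(d.contains kv'.1)) (kv :: rest)
            = kv :: List.filter (fun kv' => !(d.contains kv'.1)) rest := by
          simp [hc']
        rw [hfc]
        simp [pv_getD_not_mem rest kv.1 hk]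

-- proof-side recursion equal to A's coalescing fold: pending current interval
def pvCoalesce : Option (Int × Int) → List (Int × Int) → List (Int × Int)
  | none, [] => []
  | some c, [] => [c]
  | none, p :: r => pvCoalesce (some p) r
  | some c, p :: r =>
      if p.1 ≤ c.2 + 1 then pvCoalesce (some (c.1, max c.2 p.2)) r
      else c :: pvCoalesce (some p) r

theorem pv_foldl_stepA (l : List (Int × Int)) :
    ∀ (res : List (Int × Int)) (c : Int × Int),
      List.foldl pvStepA (res ++ [c]) l = res ++ pvCoalesce (some c) l := by
  induction l with
  | nil => intro res c; simp [pvCoalesce]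
  | cons p r ih =>
      intro res c
      by_cases h : p.1 ≤ c.2 + 1
      · have hs : pvStepA (res ++ [c]) p = res ++ [(c.1, max c.2 p.2)] := by
          simp [pvStepA, not_lt.mpr h]
        rw [List.foldl_cons, hs, ih res (c.1, max c.2 p.2)]
        simp [pvCoalesce, h]
      · have hs : pvStepA (res ++ [c]) p = (res ++ [c]) ++ [p] := by
          simp [pvStepA, lt_of_not_ge h]
        rw [List.foldl_cons, hs, ih (res ++ [c]) p]
        simp [pvCoalesce, h]

theorem pv_coalA_eq (l : List (Int × Int)) :
    List.foldl pvStepA [] l = pvCoalesce none l := by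
  cases l with
  | nil => rfl
  | cons p r =>
      have h0 : pvStepA [] p = [] ++ [p] := by simp [pvStepA]
      rw [List.foldl_cons, h0, pv_foldl_stepA r [] p]
      simp [pvCoalesce]

-- cascading absorb keeps the given lo as the head's first component
theorem pv_absorb_head (C : List (Int × Int)) :
    ∀ (lo hi : Int), ∃ h2 t, pvAbsorb lo hi C = (lo, h2) :: t := by
  induction C with
  | nil => intro lo hi; exact ⟨hi, [], rfl⟩
  | cons q r ih =>
      intro lo hi
      by_cases h : q.1 ≤ hi + 1
      · obtain ⟨h2, t, ht⟩ := ih lo (max hi q.2)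
        exact ⟨h2, t, by simpa [pvAbsorb, h] using ht⟩
      · exact ⟨hi, q :: r, by simp [pvAbsorb, h]⟩

-- two cascading absorbs with touching reaches collapse into one with the max reach
theorem pv_absorb_absorb (C : List (Int × Int)) :
    ∀ (lo h1 lo2 h2 : Int), lo2 ≤ h1 + 1 →
      pvAbsorb lo h1 (pvAbsorb lo2 h2 C) = pvAbsorb lo (max h1 h2) C := by
  induction C with
  | nil =>
      intro lo h1 lo2 h2 hle
      simp [pvAbsorb, hle]
  | cons q r ih =>
      intro lo h1 lo2 h2 hle
      by_cases h : q.1 ≤ h2 + 1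
      · have h' : q.1 ≤ max h1 h2 + 1 := le_trans h (by simp)
        rw [show pvAbsorb lo2 h2 (q :: r) = pvAbsorb lo2 (max h2 q.2) r by simp [pvAbsorb, h]]
        rw [ih lo h1 lo2 (max h2 q.2) hle]
        rw [show pvAbsorb lo (max h1 h2) (q :: r) = pvAbsorb lo (max (max h1 h2) q.2) r by simp [pvAbsorb, h']]
        rw [max_assoc]
      · rw [show pvAbsorb lo2 h2 (q :: r) = (lo2, h2) :: q :: r by simp [pvAbsorb, h]]
        by_cases hq : q.1 ≤ max h1 h2 + 1
        · have hq1 : q.1 ≤ h1 + 1 := by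
            rcases max_cases h1 h2 with ⟨he, _⟩ | ⟨he, hlt⟩
            · rwa [he] at hq
            · rw [he] at hq; omega
          rw [show pvAbsorb lo h1 ((lo2, h2) :: q :: r) = pvAbsorb lo (max h1 h2) (q :: r) by simp [pvAbsorb, hle]]
        · have hq1 : ¬ q.1 ≤ h1 + 1 := by
            intro hcon; exact hq (le_trans hcon (by simp))
          rw [show pvAbsorb lo h1 ((lo2, h2) :: q :: r) = pvAbsorb lo (max h1 h2) (q :: r) by simp [pvAbsorb, hle]]

-- extending A's pending coalesce on the left = one cascading absorb on B's result
theorem pv_coalesce_absorb (l : List (Int × Int)) :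
    ∀ (x : Int × Int), pvCoalesce (some x) l = pvAbsorb x.1 x.2 (pvCoalesce none l) := by
  induction l with
  | nil => intro x; simp [pvCoalesce, pvAbsorb]
  | cons y r ih =>
      intro x
      rw [show pvCoalesce none (y :: r) = pvCoalesce (some y) r from rfl, ih y]
      by_cases h : y.1 ≤ x.2 + 1
      · rw [show pvCoalesce (some x) (y :: r) = pvCoalesce (some (x.1, max x.2 y.2)) r by simp [pvCoalesce, h]]
        rw [ih (x.1, max x.2 y.2)]
        exact (pv_absorb_absorb (pvCoalesce none r) x.1 x.2 y.1 y.2 h).symm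
      · rw [show pvCoalesce (some x) (y :: r) = x :: pvCoalesce (some y) r by simp [pvCoalesce, h]]
        obtain ⟨h2, t, ht⟩ := pv_absorb_head (pvCoalesce none r) y.1 y.2
        rw [ih y, ht]
        simp [pvAbsorb, h]

-- A's fold equals B's right-to-left cascading coalescer, on every list
theorem pv_coal_eq_back (l : List (Int × Int)) :
    List.foldl pvStepA [] l = pvCoalesceBack l := by
  rw [pv_coalA_eq]
  unfold pvCoalesceBack
  rw [List.foldl_reverse]
  induction l with
  | nil => rfl
  | cons x r ih =>
      rw [List.foldr_cons, ← ih]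
      exact pv_coalesce_absorb r x

-- ===== VERDICT (by name: the statement is the Claim_ definition above) =====

theorem merge_interval_maps_py_eq (target source : List (String × List (Int × Int)))
    (hT : (target.map Prod.fst).Nodup) (hS : (source.map Prod.fst).Nodup) :
    merge_interval_maps_py target source = merge_interval_maps_py_alt target source := by
  unfold merge_interval_maps_py merge_interval_maps_py_alt
  simp only []
  -- the two preludes build the same dict: A's copy = B's get/concat loop over fresh keys
  have h1 : (List.foldl (fun (d : PySem.Dict String (List (Int × Int))) kv => d.insert kv.1 kv.2) PySem.Dict.empty target) = PySem.Dict.mk target := by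
    apply PySem.Dict.ext
    rw [PySem.Dict.items_foldl_insert_fresh target (fun kv => kv.1) (fun kv => kv.2) PySem.Dict.empty (fun a _ => PySem.Dict.contains_empty a.1) hT]
    simp [PySem.Dict.empty]
  have h2 : (List.foldl (fun (d : PySem.Dict String (List (Int × Int))) kv => d.insert kv.1 (d.getD kv.1 [] ++ kv.2)) PySem.Dict.empty target) = PySem.Dict.mk target := by
    apply PySem.Dict.ext
    rw [pv_merge_items target PySem.Dict.empty (by simp [PySem.Dict.empty]) hT]
    simp [PySem.Dict.empty, List.filter_true]
  rw [h1, h2]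
  -- both sides now map/fold over the items of the same merged dict M
  set M := List.foldl (fun (d : PySem.Dict String (List (Int × Int))) kv => d.insert kv.1 (d.getD kv.1 [] ++ kv.2)) (PySem.Dict.mk target) source with hM
  have hkeysT : (PySem.Dict.mk target).keys.Nodup := by simpa using hT
  have hMitems : M.items
      = (PySem.Dict.mk target).items.map (fun e => (e.1, e.2 ++ (PySem.Dict.mk source).getD e.1 []))
        ++ source.filter (fun kv => !((PySem.Dict.mk target).contains kv.1)) :=
    pv_merge_items source (PySem.Dict.mk target) hkeysT hS
  have hcont : ∀ k : String, (PySem.Dict.mk target).contains k = (target.map Prod.fst).contains k := by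
    intro k
    rw [PySem.Dict.contains_eq_decide_mem_keys, List.contains_eq_mem]
    simp
  have hsub : ((source.filter (fun kv => !((PySem.Dict.mk target).contains kv.1))).map Prod.fst).Nodup :=
    hS.sublist (List.Sublist.map Prod.fst List.filter_sublist)
  have hdisj : ∀ k ∈ (source.filter (fun kv => !((PySem.Dict.mk target).contains kv.1))).map Prod.fst,
      k ∉ target.map Prod.fst := by
    intro k hk
    obtain ⟨kv, hkv, rfl⟩ := List.mem_map.mp hk
    have := (List.mem_filter.mp hkv).2
    rw [hcont] at this
    simp only [Bool.not_eq_true', List.contains_eq_mem, decide_eq_false_iff_not] at this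
    exact this
  have hMnodup : (M.items.map (fun kv : String × List (Int × Int) => kv.1)).Nodup := by
    rw [hMitems, List.map_append, List.map_map]
    apply List.Nodup.append
    · simpa using hT
    · simpa using hsub
    · intro k h1k h2k
      exact hdisj k (by simpa using h2k) (by simpa using h1k)
  rw [PySem.Dict.items_foldl_insert_fresh M.items (fun kv => kv.1)
        (fun kv => List.foldl pvStepA [] (PySem.List.sorted2 kv.2 Prod.fst Prod.snd))
        PySem.Dict.empty (fun a _ => PySem.Dict.contains_empty a.1) hMnodup]
  have hitems : (PySem.Dict.empty : PySem.Dict String (List (Int × Int))).items = [] := rfl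
  rw [hitems, List.nil_append]
  apply List.map_congr_left
  intro kv _
  rw [pv_coal_eq_back]

theorem merge_interval_maps_py_spec : Claim_equal_merge_interval_maps_py := by
  intro target source _ hpre
  exact merge_interval_maps_py_eq target source hpre.1 hpre.2
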